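-- pv_equiv track=rewrite | github.com/saurabh-pandey/EPIJudgeClone | epi_judge_python/permutations.py | permutations_v3
-- ===== SOURCE A (Python) =====
-- from typing import List
--
-- def permutations_v3(A: List[int]) -> List[List[int]]:
--     '''
--     Another Book's version
--     '''
--     def next_permutation() -> List[int]:
--         '''
--         Idea is to see A and find the smallest bigger number that can be formed
--         by just rearranging. If A is already in descending order then we have to
--         return empty list. This will mark the end of search.
--         General idea to find the next bigger permutation is to find the
--         furthest point where a subsequent bigger number can be used. Once that
--         bigger number is placed in that place everything later is to be in
--         ascending order.
--         An algorithm that might do the trick is as follows: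
--         1. Find the furthest number whose next number is bigger. Call it pivot.
--         2. Next replace this pivot with the next bigger subsequent number.
--         3. Now everything next to pivot should be arranged in ascending order.
--         4. Above sorting can be simplified as the smallest number is the pivot.
--         5. Everything else after pivot has to be in descending order to begin
--         with otherwise the choice of pivot is wrong.
--         6. Thus ascending order is pivot followed by last number and then
--         progressing in reverse until reaching next to the pivot point.
--
--         If all the numbers are in descending order then we won't be able to
--         find the pivot element. This means we fail at step 1 of the above algo.
--         In such a situation we return empty list.
--         '''
--         pivot_index = -1
--         for i in range(len(A) - 1):
--             if A[i] < A[i + 1]: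
--                 pivot_index = i
--         if pivot_index == -1:
--             return []
--         next_bigger_index = len(A) - 1
--         for i in range(len(A) - 1, pivot_index, -1):
--             if A[i] > A[pivot_index]:
--                 next_bigger_index = i
--                 break
--         A[pivot_index], A[next_bigger_index] = A[next_bigger_index], A[pivot_index]
--         A[pivot_index + 1:] = sorted(A[pivot_index + 1:])
--         return A
--     permutations = []
--     while True:
--         permutations.append(A[:])
--         A = next_permutation()
--         if not A:
--             break
--     return permutations
-- ===== SOURCE B (Python) =====
-- from typing import List
--
-- def permutations_v3(A: List[int]) -> List[List[int]]:
--     # Builds each permutation >= A position by position (digit-DP style recursion over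
--     # the sorted pool of remaining values), instead of iterating next-permutation.
--     # Does not mutate the caller's list (the original does); return value is the same.
--     n = len(A)
--     out = []
--
--     def rec(prefix, remaining, tight):
--         # remaining: sorted list of the values not yet placed
--         if not remaining:
--             out.append(prefix)
--             return
--         pos = len(prefix)
--         for k, v in enumerate(remaining):
--             if k > 0 and remaining[k - 1] == v:
--                 continue  # same value already tried at this position
--             if tight and v < A[pos]:
--                 continue  # would fall below A
--             rec(prefix + [v], remaining[:k] + remaining[k + 1:],
--                 tight and v == A[pos])
--
--     rec([], sorted(A), True)
--     return out
-- ===== Notes on version B (the rewrite author's own statement) =====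
-- stated objective: alternative
-- what changed: B abandons the next-permutation iteration entirely: it builds every output permutation position by position, recursing over the sorted pool of remaining values with a tight-prefix constraint (digit-DP style), emitting exactly the distinct rearrangements >= A in lexicographic order; B also does not mutate the caller's list.
import Mathlib
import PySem

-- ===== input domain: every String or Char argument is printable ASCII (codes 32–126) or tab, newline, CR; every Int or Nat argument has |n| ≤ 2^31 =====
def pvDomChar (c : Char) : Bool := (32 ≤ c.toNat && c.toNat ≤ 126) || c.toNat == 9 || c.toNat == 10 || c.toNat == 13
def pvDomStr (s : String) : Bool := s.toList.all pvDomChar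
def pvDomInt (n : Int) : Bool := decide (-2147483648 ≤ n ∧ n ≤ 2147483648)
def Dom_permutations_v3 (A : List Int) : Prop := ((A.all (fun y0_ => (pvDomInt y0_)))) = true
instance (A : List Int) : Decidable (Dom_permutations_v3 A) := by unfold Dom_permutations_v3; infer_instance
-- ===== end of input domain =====

-- B builds each output permutation position by position (recursion over the sorted pool of
-- remaining values, with a tight-prefix constraint), instead of iterating next-permutation.
-- Equivalence is about the RETURN value: Python A mutates its argument in place, B does not.

-- ===== PORT A =====
-- 'for i in range(len(A)-1, pivot, -1): if A[i] > A[pivot]: nb = i; break' (default len(A)-1)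
def pvFindNbA (A : List Int) (p : Nat) : Nat → Nat
  | 0 => A.length - 1
  | i + 1 =>
    if p < i + 1 then
      (if A.getD (i + 1) 0 > A.getD p 0 then i + 1 else pvFindNbA A p i)
    else A.length - 1

-- the body of next_permutation(); '[]' is Python's empty-list end marker
def pvStepA (A : List Int) : List Int :=
  let pivot : Int :=
    (List.range (A.length - 1)).foldl
      (fun pv i => if A.getD i 0 < A.getD (i + 1) 0 then (i : Int) else pv) (-1)
  if pivot = -1 then []
  else
    let p := pivot.toNat
    let nb := pvFindNbA A p (A.length - 1)
    let B := (A.set p (A.getD nb 0)).set nb (A.getD p 0)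
    B.take (p + 1) ++ PySem.List.sorted (B.drop (p + 1)) (fun x => x)

-- 'while True: permutations.append(A[:]); A = next_permutation(); if not A: break'
-- (fuel is a totality guard only; n! iterations are never exceeded)
def pvLoopA : Nat → List Int → List (List Int)
  | 0, A => [A]
  | f + 1, A =>
    let A' := pvStepA A
    if A' = [] then [A] else A :: pvLoopA f A'

def permutations_v3 (A : List Int) : List (List Int) :=
  pvLoopA (Nat.factorial A.length) A

-- ===== PORT B =====
-- 'def rec(prefix, remaining, tight): …' — the for-loop over enumerate(remaining) becomes a
-- foldl over range(len(remaining)); the shared 'out' accumulator becomes the fold state.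
-- (fuel = len(remaining) is a totality guard only: each call removes one element)
def pvRecB (A : List Int) : Nat → List Int → List Int → Bool → List (List Int)
  | _, pre, [], _ => [pre]
  | 0, _, _ :: _, _ => []
  | f + 1, pre, r :: rs, tight =>
    (List.range (r :: rs).length).foldl (fun acc k =>
      let rem := r :: rs
      let v := rem.getD k 0
      if 0 < k ∧ rem.getD (k - 1) 0 = v then acc
      else if tight && decide (v < A.getD pre.length 0) then acc
      else acc ++ pvRecB A f (pre ++ [v]) (rem.take k ++ rem.drop (k + 1))
            (tight && decide (v = A.getD pre.length 0))) []

-- 'rec([], sorted(A), True)'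
def permutations_v3_alt (A : List Int) : List (List Int) :=
  let srt := PySem.List.sorted A (fun x => x)
  pvRecB A srt.length [] srt true

-- ===== PRECONDITION & SPEC =====
def Spec_permutations_v3 (A : List Int) (out : List (List Int)) : Prop := out = permutations_v3_alt A
instance (A : List Int) (out : List (List Int)) : Decidable (Spec_permutations_v3 A out) := by unfold Spec_permutations_v3; infer_instance

-- ===== CLAIM (what is proved, stated in full; the proofs are below) =====
def Claim_equal_permutations_v3 : Prop := ∀ (A : List Int), Dom_permutations_v3 A → Spec_permutations_v3 A (permutations_v3 A)

-- ===== LEMMAS AND PROOFS =====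

-- strict lexicographic order on integer lists (Python's '<' on lists)
def pvLt : List Int → List Int → Bool
  | [], [] => false
  | [], _ :: _ => true
  | _ :: _, [] => false
  | a :: as, b :: bs => decide (a < b) || (decide (a = b) && pvLt as bs)

def pvLe (x y : List Int) : Bool := decide (x = y) || pvLt x y

theorem pvLt_irrefl : ∀ (x : List Int), pvLt x x = false := by
  intro x; induction x with
  | nil => rfl
  | cons a as ih => simp [pvLt, ih]

theorem pvLt_trans : ∀ (x y z : List Int), pvLt x y = true → pvLt y z = true → pvLt x z = true := by
  intro x
  induction x with
  | nil =>
    intro y z h1 h2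
    cases y with
    | nil => simp [pvLt] at h1
    | cons b bs => cases z with
      | nil => simp [pvLt] at h2
      | cons c cs => simp [pvLt]
  | cons a as ih =>
    intro y z h1 h2
    cases y with
    | nil => simp [pvLt] at h1
    | cons b bs =>
      cases z with
      | nil => simp [pvLt] at h2
      | cons c cs =>
        simp only [pvLt, Bool.or_eq_true, Bool.and_eq_true, decide_eq_true_eq] at h1 h2 ⊢
        rcases h1 with h1 | ⟨rfl, h1⟩
        · rcases h2 with h2 | ⟨rfl, h2⟩
          · exact Or.inl (lt_trans h1 h2)
          · exact Or.inl h1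
        · rcases h2 with h2 | ⟨rfl, h2⟩
          · exact Or.inl h2
          · exact Or.inr ⟨rfl, ih _ _ h1 h2⟩

theorem pvLt_asymm {x y : List Int} (h1 : pvLt x y = true) (h2 : pvLt y x = true) : False := by
  have := pvLt_trans x y x h1 h2
  rw [pvLt_irrefl] at this
  exact Bool.false_ne_true this

theorem pvLe_refl (x : List Int) : pvLe x x = true := by simp [pvLe]

theorem pvLt_of_lt_of_le {x y z : List Int} (h1 : pvLt x y = true) (h2 : pvLe y z = true) :
    pvLt x z = true := by
  unfold pvLe at h2
  rcases (by simpa using h2 : y = z ∨ pvLt y z = true) with rfl | h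
  · exact h1
  · exact pvLt_trans _ _ _ h1 h

theorem pvLt_append : ∀ (x u w : List Int), pvLt (x ++ u) (x ++ w) = pvLt u w := by
  intro x u w
  induction x with
  | nil => rfl
  | cons a as ih => simp [pvLt, ih]

theorem pvLe_cons_same (a : Int) (u w : List Int) : pvLe (a :: u) (a :: w) = pvLe u w := by
  simp [pvLe, pvLt]

-- an ascending-sorted list is the lexicographic minimum of its rearrangements
theorem sorted_min : ∀ (s p : List Int), List.Pairwise (· ≤ ·) s → p.Perm s → pvLe s p = true := by
  intro s
  induction s with
  | nil =>
    intro p _ hp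
    rw [List.perm_nil.mp hp]
    simp [pvLe]
  | cons a s' ih =>
    intro p hpw hp
    cases p with
    | nil => simpa using hp.length_eq
    | cons c p' =>
      have hc : c ∈ a :: s' := hp.mem_iff.mp (List.mem_cons_self ..)
      have hac : a ≤ c := by
        rcases List.mem_cons.mp hc with rfl | h
        · exact le_refl _
        · exact (List.pairwise_cons.mp hpw).1 c h
      rcases lt_or_eq_of_le hac with hlt | heq
      · simp [pvLe, pvLt, hlt]
      · subst heq
        rw [pvLe_cons_same]
        exact ih p' (List.pairwise_cons.mp hpw).2 hp.cons_inv

-- a descending-sorted list is the lexicographic maximum of its rearrangements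
theorem desc_max : ∀ (s p : List Int), List.Pairwise (fun x y => y ≤ x) s → p.Perm s → pvLe p s = true := by
  intro s
  induction s with
  | nil =>
    intro p _ hp
    rw [List.perm_nil.mp hp]
    simp [pvLe]
  | cons a s' ih =>
    intro p hpw hp
    cases p with
    | nil => simpa using hp.length_eq
    | cons c p' =>
      have hc : c ∈ a :: s' := hp.mem_iff.mp (List.mem_cons_self ..)
      have hca : c ≤ a := by
        rcases List.mem_cons.mp hc with rfl | h
        · exact le_refl _
        · exact (List.pairwise_cons.mp hpw).1 c h
      rcases lt_or_eq_of_le hca with hlt | heq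
      · simp [pvLe, pvLt, hlt]
      · subst heq
        rw [pvLe_cons_same]
        exact ih p' (List.pairwise_cons.mp hpw).2 hp.cons_inv

-- two strictly-increasing lists with the same members are equal
theorem pw_ext : ∀ (l1 l2 : List (List Int)),
    l1.Pairwise (fun p q => pvLt p q = true) → l2.Pairwise (fun p q => pvLt p q = true) →
    (∀ x, x ∈ l1 ↔ x ∈ l2) → l1 = l2 := by
  intro l1
  induction l1 with
  | nil =>
    intro l2 _ _ hm
    cases l2 with
    | nil => rfl
    | cons b t2 =>
      have := (hm b).mpr (List.mem_cons_self ..)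
      simp at this
  | cons a t1 ih =>
    intro l2 h1 h2 hm
    cases l2 with
    | nil =>
      have := (hm a).mp (List.mem_cons_self ..)
      simp at this
    | cons b t2 =>
      obtain ⟨ha1, ht1⟩ := List.pairwise_cons.mp h1
      obtain ⟨hb2, ht2⟩ := List.pairwise_cons.mp h2
      have hab : a = b := by
        rcases List.mem_cons.mp ((hm a).mp (List.mem_cons_self ..)) with h | h
        · exact h
        · rcases List.mem_cons.mp ((hm b).mpr (List.mem_cons_self ..)) with h' | h'
          · exact h'.symm
          · exact (pvLt_asymm (ha1 b h') (hb2 a h)).elim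
      subst hab
      congr 1
      apply ih t2 ht1 ht2
      intro x
      constructor
      · intro hx
        rcases List.mem_cons.mp ((hm x).mp (List.mem_cons_of_mem _ hx)) with rfl | h
        · have := ha1 x hx
          rw [pvLt_irrefl] at this
          exact (Bool.false_ne_true this).elim
        · exact h
      · intro hx
        rcases List.mem_cons.mp ((hm x).mpr (List.mem_cons_of_mem _ hx)) with rfl | h
        · have := hb2 x hx
          rw [pvLt_irrefl] at this
          exact (Bool.false_ne_true this).elim
        · exact h

theorem two_le_length {a b : List Int} {l : List (List Int)} (ha : a ∈ l) (hb : b ∈ l)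
    (hne : a ≠ b) : 2 ≤ l.length := by
  cases l with
  | nil => simp at ha
  | cons c t =>
    rcases List.mem_cons.mp ha with rfl | ha'
    · rcases List.mem_cons.mp hb with rfl | hb'
      · exact absurd rfl hne
      · have := List.length_pos_of_mem hb'
        simp only [List.length_cons]
        omega
    · have := List.length_pos_of_mem ha'
      simp only [List.length_cons]
      omega

-- ===== analysis of port A's step =====

-- right-to-left early-exit pivot scan (proof-side helper)
def pvPivotB (A : List Int) : Nat → Option Nat
  | 0 => none
  | k + 1 => if A.getD k 0 ≥ A.getD (k + 1) 0 then pvPivotB A k else some k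

def pvFindJB (A : List Int) (pv : Int) : Nat → Nat
  | 0 => 0
  | j + 1 => if A.getD (j + 1) 0 ≤ pv then pvFindJB A pv j else j + 1

-- swap + reverse form of the step (proof-side helper)
def pvStepB (A : List Int) : Option (List Int) :=
  match pvPivotB A (A.length - 1) with
  | none => none
  | some i =>
    let j := pvFindJB A (A.getD i 0) (A.length - 1)
    let B := (A.set i (A.getD j 0)).set j (A.getD i 0)
    some (B.take (i + 1) ++ (B.drop (i + 1)).reverse)

theorem pivot_fold_eq (A : List Int) (k : Nat) :
    (List.range k).foldl
      (fun pv i => if A.getD i 0 < A.getD (i + 1) 0 then (i : Int) else pv) (-1)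
    = (match pvPivotB A k with | none => (-1 : Int) | some p => (p : Int)) := by
  induction k with
  | zero => simp [pvPivotB]
  | succ k ih =>
    rw [List.range_succ, List.foldl_append, ih]
    simp only [List.foldl_cons, List.foldl_nil, pvPivotB]
    split_ifs with h1 h2 h2 <;> first | rfl | omega

theorem pivotB_spec (A : List Int) (k p : Nat) (h : pvPivotB A k = some p) :
    p + 1 ≤ k ∧ A.getD p 0 < A.getD (p + 1) 0 ∧
      (∀ i, p < i → i + 1 ≤ k → A.getD (i + 1) 0 ≤ A.getD i 0) := by
  induction k with
  | zero => simp [pvPivotB] at h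
  | succ k ih =>
    unfold pvPivotB at h
    split_ifs at h with hk
    · obtain ⟨h1, h2, h3⟩ := ih h
      refine ⟨by omega, h2, ?_⟩
      intro i hi hik
      rcases Nat.lt_or_ge (i + 1) (k + 1) with hlt | hge
      · exact h3 i hi (by omega)
      · have he : i = k := by omega
        subst he; exact hk
    · injection h with h
      subst h
      exact ⟨le_refl _, by omega, fun i hi hik => by omega⟩

theorem pivotB_none (A : List Int) (k : Nat) (h : pvPivotB A k = none) :
    ∀ t, t + 1 ≤ k → A.getD (t + 1) 0 ≤ A.getD t 0 := by
  induction k with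
  | zero => intro t ht; omega
  | succ k ih =>
    unfold pvPivotB at h
    split_ifs at h with hk
    · intro t ht
      rcases Nat.lt_or_ge (t + 1) (k + 1) with hlt | hge
      · exact ih h t (by omega)
      · have : t = k := by omega
        subst this; exact hk

theorem find_eq (A : List Int) (p : Nat) :
    ∀ j, (∃ m, p < m ∧ m ≤ j ∧ A.getD p 0 < A.getD m 0) →
      pvFindNbA A p j = pvFindJB A (A.getD p 0) j ∧
      p < pvFindJB A (A.getD p 0) j ∧ pvFindJB A (A.getD p 0) j ≤ j ∧
      A.getD p 0 < A.getD (pvFindJB A (A.getD p 0) j) 0 ∧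
      (∀ t, pvFindJB A (A.getD p 0) j < t → t ≤ j → A.getD t 0 ≤ A.getD p 0) := by
  intro j
  induction j with
  | zero => rintro ⟨m, h1, h2, _⟩; omega
  | succ j ih =>
    rintro ⟨m, h1, h2, h3⟩
    by_cases h : A.getD (j + 1) 0 ≤ A.getD p 0
    · have hm : m ≤ j := by
        rcases Nat.lt_or_ge m (j + 1) with hlt | hge
        · omega
        · exfalso
          have he : m = j + 1 := by omega
          subst he; exact absurd h3 (not_lt.mpr h)
      have hpj : p < j + 1 := by omega
      obtain ⟨heq, hr1, hr2, hr3, hr4⟩ := ih ⟨m, h1, hm, h3⟩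
      rw [pvFindNbA, pvFindJB, if_pos hpj, if_neg (not_lt.mpr h), if_pos h]
      refine ⟨heq, hr1, by omega, hr3, ?_⟩
      intro t ht1 ht2
      rcases Nat.lt_or_ge t (j + 1) with hlt | hge
      · exact hr4 t ht1 (by omega)
      · have he : t = j + 1 := by omega
        subst he; exact h
    · have hpj : p < j + 1 := by omega
      rw [pvFindNbA, pvFindJB, if_pos hpj, if_pos (not_le.mp h), if_neg h]
      exact ⟨rfl, hpj, le_refl _, not_le.mp h, fun t ht1 ht2 => by omega⟩

theorem getD_drop (l : List Int) (m i : Nat) (h : m + i < l.length) :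
    (l.drop m).getD i 0 = l.getD (m + i) 0 := by
  rw [List.getD_eq_getElem _ _ (by simp; omega), List.getD_eq_getElem _ _ h]
  exact List.getElem_drop ..

theorem getD_take (l : List Int) (k i : Nat) (h1 : i < k) (h2 : i < l.length) :
    (l.take k).getD i 0 = l.getD i 0 := by
  rw [List.getD_eq_getElem _ _ (by simp; omega), List.getD_eq_getElem _ _ h2]
  exact List.getElem_take

-- adjacent non-increase gives pairwise non-increase
theorem pairwise_ge_of_adj (l : List Int)
    (h : ∀ i, i + 1 < l.length → l.getD (i + 1) 0 ≤ l.getD i 0) :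
    l.Pairwise (fun a b => b ≤ a) := by
  have key : ∀ d i, i + d < l.length → l.getD (i + d) 0 ≤ l.getD i 0 := by
    intro d
    induction d with
    | zero => intro i _; simp
    | succ d ihd =>
      intro i h2
      calc l.getD (i + (d + 1)) 0 = l.getD ((i + d) + 1) 0 := by ring_nf
        _ ≤ l.getD (i + d) 0 := h (i + d) (by omega)
        _ ≤ l.getD i 0 := ihd i (by omega)
  rw [List.pairwise_iff_getElem]
  intro i j hi hj hij
  have hk := key (j - i) i (by omega)
  rw [show i + (j - i) = j by omega] at hk
  rwa [List.getD_eq_getElem _ _ hj, List.getD_eq_getElem _ _ hi] at hk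

theorem desc_mono (A : List Int) (i n : Nat)
    (hadj : ∀ t, i < t → t + 1 ≤ n → A.getD (t + 1) 0 ≤ A.getD t 0) :
    ∀ s t, i < s → s ≤ t → t ≤ n → A.getD t 0 ≤ A.getD s 0 := by
  have key : ∀ d s, i < s → s + d ≤ n → A.getD (s + d) 0 ≤ A.getD s 0 := by
    intro d
    induction d with
    | zero => intro s _ _; simp
    | succ d ihd =>
      intro s hs h2
      calc A.getD (s + (d + 1)) 0 = A.getD ((s + d) + 1) 0 := by ring_nf
        _ ≤ A.getD (s + d) 0 := hadj (s + d) (by omega) (by omega)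
        _ ≤ A.getD s 0 := ihd s hs (by omega)
  intro s t hs hst htn
  have := key (t - s) s hs (by omega)
  rwa [show s + (t - s) = t by omega] at this

theorem getD_set_self (l : List Int) (i : Nat) (a : Int) (h : i < l.length) :
    (l.set i a).getD i 0 = a := by
  rw [List.getD_eq_getElem _ _ (by simpa using h)]
  simp

theorem getD_set_ne (l : List Int) (i j : Nat) (a : Int) (h : i ≠ j) :
    (l.set i a).getD j 0 = l.getD j 0 := by
  rcases Nat.lt_or_ge j l.length with hj | hj
  · rw [List.getD_eq_getElem _ _ (by simpa using hj), List.getD_eq_getElem _ _ hj]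
    simp [h]
  · rw [List.getD_eq_default _ _ (by simpa using hj), List.getD_eq_default _ _ hj]

-- the step functions agree: either both signal the end, or they produce the same list
theorem step_eq (A : List Int) :
    (pvStepB A = none ∧ pvStepA A = []) ∨
    (∃ C, pvStepB A = some C ∧ pvStepA A = C ∧ C ≠ []) := by
  rcases hpiv : pvPivotB A (A.length - 1) with _ | p
  · left
    constructor
    · simp [pvStepB, hpiv]
    · unfold pvStepA
      rw [pivot_fold_eq, hpiv]
      simp
  · right
    obtain ⟨hp1, hp2, hp3⟩ := pivotB_spec A (A.length - 1) p hpiv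
    have hn : 2 ≤ A.length := by omega
    obtain ⟨heq, hr1, hr2, hr3, hr4⟩ := find_eq A p (A.length - 1) ⟨p + 1, by omega, hp1, hp2⟩
    set r := pvFindJB A (A.getD p 0) (A.length - 1) with hrdef
    set B := (A.set p (A.getD r 0)).set r (A.getD p 0) with hBdef
    have hpr : p ≠ r := by omega
    have hBlen : B.length = A.length := by simp [hBdef]
    have hBr : B.getD r 0 = A.getD p 0 := getD_set_self _ r _ (by simp; omega)
    have hBp : B.getD p 0 = A.getD r 0 := by
      rw [hBdef, getD_set_ne _ _ _ _ (Ne.symm hpr), getD_set_self _ p _ (by omega)]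
    have hBo : ∀ u, u ≠ p → u ≠ r → B.getD u 0 = A.getD u 0 := by
      intro u hu1 hu2
      rw [hBdef, getD_set_ne _ _ _ _ (Ne.symm hu2), getD_set_ne _ _ _ _ (Ne.symm hu1)]
    -- the suffix after the swap is non-increasing
    have hadj : ∀ i, i + 1 < (B.drop (p + 1)).length →
        (B.drop (p + 1)).getD (i + 1) 0 ≤ (B.drop (p + 1)).getD i 0 := by
      intro i hilen
      have hlen' : (B.drop (p + 1)).length = A.length - (p + 1) := by simp [hBlen]
      have hv : (p + 1) + (i + 1) < A.length := by omega
      rw [getD_drop _ _ _ (by omega), getD_drop _ _ _ (by omega)]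
      set u := (p + 1) + i with hudef
      have hup : u ≠ p := by omega
      have hvp : (p + 1) + (i + 1) = u + 1 := by omega
      rw [hvp]
      have hu1p : u + 1 ≠ p := by omega
      by_cases hv1 : u + 1 = r
      · have hur : u ≠ r := by omega
        rw [hv1, hBr, hBo u hup hur]
        rcases Nat.lt_or_ge p u with hpu | hpu
        · have := hp3 u hpu (by omega)
          rw [show u + 1 = r from hv1] at this
          omega
        · omega
      · by_cases hu : u = r
        · have hBu : B.getD u 0 = A.getD p 0 := by rw [hu, hBr]
          rw [hBu, hBo (u + 1) hu1p (by omega)]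
          exact hr4 (u + 1) (by omega) (by omega)
        · rw [hBo u hup hu, hBo (u + 1) hu1p hv1]
          exact hp3 u (by omega) (by omega)
    have hsorted : PySem.List.sorted (B.drop (p + 1)) (fun x => x) = (B.drop (p + 1)).reverse :=
      PySem.List.sorted_id_eq_of_perm_of_pairwise _ _ (List.reverse_perm _)
        (List.pairwise_reverse.mpr (pairwise_ge_of_adj _ hadj))
    refine ⟨B.take (p + 1) ++ (B.drop (p + 1)).reverse, ?_, ?_, ?_⟩
    · simp only [pvStepB, hpiv]
      rw [← hrdef, ← hBdef]
    · unfold pvStepA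
      rw [pivot_fold_eq, hpiv]
      rw [if_neg (show ¬((p : Int) = -1) by omega)]
      simp only [Int.toNat_natCast, heq]
      rw [← hBdef, hsorted]
    · intro hC
      have := congrArg List.length hC
      simp [hBlen] at this
      omega

-- the swap + reverse step, decomposed structurally
theorem stepB_decomp (A C : List Int) (h : pvStepB A = some C) :
    ∃ X a mid b tail, A = X ++ a :: (mid ++ b :: tail) ∧
      C = X ++ b :: (mid ++ a :: tail).reverse ∧ a < b ∧
      List.Pairwise (fun x y => y ≤ x) (mid ++ b :: tail) ∧
      List.Pairwise (fun x y => y ≤ x) (mid ++ a :: tail) ∧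
      (∀ e ∈ mid ++ b :: tail, a < e → b ≤ e) := by
  have drop_dec : ∀ (l : List Int) (k : Nat), k < l.length → l.drop k = l.getD k 0 :: l.drop (k + 1) := by
    intro l k hk
    rw [List.getD_eq_getElem _ _ hk, List.getElem_cons_drop]
  unfold pvStepB at h
  rcases hpiv : pvPivotB A (A.length - 1) with _ | i
  · rw [hpiv] at h; simp at h
  · rw [hpiv] at h
    simp only [Option.some.injEq] at h
    obtain ⟨hp1, hp2, hp3⟩ := pivotB_spec A (A.length - 1) i hpiv
    have hn : 2 ≤ A.length := by omega
    obtain ⟨_, hr1, hr2, hr3, hr4⟩ := find_eq A i (A.length - 1) ⟨i + 1, by omega, hp1, hp2⟩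
    subst h
    set j := pvFindJB A (A.getD i 0) (A.length - 1) with hj
    have hjn : j < A.length := by omega
    have hin : i < A.length := by omega
    have hij : i < j := hr1
    set a := A.getD i 0 with ha
    set b := A.getD j 0 with hb
    set mid := (A.drop (i + 1)).take (j - (i + 1)) with hmid
    set tail := A.drop (j + 1) with htail
    have hmidlen : mid.length = j - (i + 1) := by
      rw [hmid, List.length_take, List.length_drop]
      omega
    have htaillen : tail.length = A.length - (j + 1) := by
      rw [htail, List.length_drop]
    -- decomposition of A
    have e1 : A.drop j = b :: tail := drop_dec A j (by omega)
    have e2 : A.drop (i + 1) = mid ++ b :: tail := by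
      conv_lhs => rw [← List.take_append_drop (j - (i + 1)) (A.drop (i + 1))]
      rw [List.drop_drop, show (i + 1) + (j - (i + 1)) = j by omega, e1]
    have e0 : A = A.take i ++ a :: (mid ++ b :: tail) := by
      conv_lhs => rw [← List.take_append_drop i A]
      rw [drop_dec A i (by omega), e2]
    -- values of mid / tail elements
    have hmid_elt : ∀ x ∈ mid, b ≤ x := by
      intro x hx
      obtain ⟨u, hu, hux⟩ := List.mem_iff_getElem.mp hx
      rw [hmidlen] at hu
      have hx' : x = A.getD (i + 1 + u) 0 := by
        rw [← hux, ← List.getD_eq_getElem _ 0 (by rw [hmidlen]; omega)]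
        rw [hmid, getD_take _ _ _ hu (by rw [List.length_drop]; omega)]
        rw [getD_drop _ _ _ (by omega)]
      rw [hx', hb]
      exact desc_mono A i (A.length - 1) hp3 (i + 1 + u) j (by omega) (by omega) (by omega)
    have htail_elt : ∀ y ∈ tail, y ≤ a := by
      intro y hy
      obtain ⟨u, hu, huy⟩ := List.mem_iff_getElem.mp hy
      rw [htaillen] at hu
      have hy' : y = A.getD (j + 1 + u) 0 := by
        rw [← huy, ← List.getD_eq_getElem _ 0 (by rw [htaillen]; omega)]
        rw [htail, getD_drop _ _ _ (by omega)]
      rw [hy']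
      exact hr4 (j + 1 + u) (by omega) (by omega)
    -- pairwise facts
    have hPWd : (A.drop (i + 1)).Pairwise (fun x y => y ≤ x) := by
      apply pairwise_ge_of_adj
      intro t ht
      rw [List.length_drop] at ht
      rw [getD_drop _ _ _ (by omega), getD_drop _ _ _ (by omega)]
      rw [show (i + 1) + (t + 1) = ((i + 1) + t) + 1 by omega]
      exact hp3 ((i + 1) + t) (by omega) (by omega)
    have hPW1 : (mid ++ b :: tail).Pairwise (fun x y => y ≤ x) := by
      rw [← e2]; exact hPWd
    have hmidPW : mid.Pairwise (fun x y => y ≤ x) :=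
      List.Pairwise.sublist (List.take_sublist _ _) hPWd
    have htailPW : tail.Pairwise (fun x y => y ≤ x) := by
      have : tail = (A.drop (i + 1)).drop (j - i) := by
        rw [List.drop_drop, show (i + 1) + (j - i) = j + 1 by omega, htail]
      rw [this]
      exact List.Pairwise.sublist (List.drop_sublist _ _) hPWd
    have hPW2 : (mid ++ a :: tail).Pairwise (fun x y => y ≤ x) := by
      rw [List.pairwise_append]
      refine ⟨hmidPW, ?_, ?_⟩
      · rw [List.pairwise_cons]
        exact ⟨htail_elt, htailPW⟩
      · intro x hx y hy
        have hbx := hmid_elt x hx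
        rcases List.mem_cons.mp hy with rfl | hyt
        · rw [ha]; rw [hb] at hbx; omega
        · have := htail_elt y hyt
          rw [ha] at this; rw [hb] at hbx
          omega
    -- the produced list
    have hBt : ((A.set i b).set j a).take (i + 1) = A.take i ++ [b] := by
      rw [List.take_set, List.set_eq_of_length_le (by simp [List.length_take]; omega)]
      rw [List.take_set, List.set_eq_take_append_cons_drop,
        if_pos (by simp [List.length_take]; omega)]
      rw [List.take_take, List.drop_eq_nil_of_le (by simp [List.length_take])]
      simp
    have hBd : ((A.set i b).set j a).drop (i + 1) = mid ++ a :: tail := by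
      rw [List.drop_set, if_neg (by omega)]
      rw [List.drop_set, if_pos (by omega)]
      rw [List.set_eq_take_append_cons_drop, if_pos (by rw [List.length_drop]; omega)]
      rw [List.drop_drop, show (i + 1) + (j - (i + 1) + 1) = j + 1 by omega]
    refine ⟨A.take i, a, mid, b, tail, e0, ?_, hr3, hPW1, hPW2, ?_⟩
    · rw [hBt, hBd, List.append_assoc, List.singleton_append]
    · intro e he hae
      rcases List.mem_append.mp he with hm | hbt
      · exact hmid_elt e hm
      · rcases List.mem_cons.mp hbt with rfl | ht
        · exact le_refl _
        · have := htail_elt e ht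
          omega

-- minimality core at the pivot position
theorem step_core (a b : Int) (mid tail q r : List Int)
    (hd : List.Pairwise (fun x y => y ≤ x) (mid ++ b :: tail))
    (hab : a < b)
    (hmin : ∀ e ∈ mid ++ b :: tail, a < e → b ≤ e)
    (hr : List.Pairwise (· ≤ ·) r) (hrp : r.Perm (a :: (mid ++ tail)))
    (hq : q.Perm (a :: (mid ++ b :: tail)))
    (hlt : pvLt (a :: (mid ++ b :: tail)) q = true) :
    pvLe (b :: r) q = true := by
  cases q with
  | nil => simpa using hq.length_eq
  | cons c q' =>
    simp only [pvLt, Bool.or_eq_true, Bool.and_eq_true, decide_eq_true_eq] at hlt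
    rcases hlt with hac | ⟨hac, hlt⟩
    · have hc : c ∈ a :: (mid ++ b :: tail) := hq.mem_iff.mp (List.mem_cons_self ..)
      have hcd : c ∈ mid ++ b :: tail := by
        rcases List.mem_cons.mp hc with rfl | h
        · exact absurd hac (lt_irrefl _)
        · exact h
      have hbc : b ≤ c := hmin c hcd hac
      rcases lt_or_eq_of_le hbc with hlt2 | heq
      · simp [pvLe, pvLt, hlt2]
      · subst heq
        have h1 : (a :: (mid ++ b :: tail)).Perm (b :: (a :: (mid ++ tail))) := by
          have hmm : ((a :: mid) ++ b :: tail).Perm (b :: ((a :: mid) ++ tail)) :=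
            List.perm_middle
          simpa using hmm
        have hq' : q'.Perm (a :: (mid ++ tail)) := (hq.trans h1).cons_inv
        rw [pvLe_cons_same]
        exact sorted_min r q' hr (hq'.trans hrp.symm)
    · exfalso
      subst hac
      have hq' : q'.Perm (mid ++ b :: tail) := hq.cons_inv
      have hled := desc_max _ q' hd hq'
      have := pvLt_of_lt_of_le hlt hled
      rw [pvLt_irrefl] at this
      exact Bool.false_ne_true this

theorem prefix_lift : ∀ (X s t : List Int),
    (∀ q, q.Perm s → pvLt s q = true → pvLe t q = true) →
    ∀ p, p.Perm (X ++ s) → pvLt (X ++ s) p = true → pvLe (X ++ t) p = true := by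
  intro X
  induction X with
  | nil => intro s t h p hp hlt; exact h p hp hlt
  | cons e X ih =>
    intro s t h p hp hlt
    cases p with
    | nil => simpa using hp.length_eq
    | cons c p' =>
      rw [List.cons_append] at hp hlt
      simp only [pvLt, Bool.or_eq_true, Bool.and_eq_true, decide_eq_true_eq] at hlt
      rcases hlt with hlt | ⟨rfl, hlt⟩
      · simp [pvLe, pvLt, hlt]
      · rw [List.cons_append, pvLe_cons_same]
        exact ih s t h p' hp.cons_inv hlt

theorem stepA_none (A : List Int) (h : pvStepA A = []) :
    ∀ p, p.Perm A → pvLt A p = false := by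
  intro p hp
  rcases step_eq A with ⟨h1, _⟩ | ⟨C, _, h2, h3⟩
  · unfold pvStepB at h1
    rcases hpiv : pvPivotB A (A.length - 1) with _ | i
    · have hadj : ∀ t, t + 1 < A.length → A.getD (t + 1) 0 ≤ A.getD t 0 :=
        fun t ht => pivotB_none A _ hpiv t (by omega)
      have hle := desc_max A p (pairwise_ge_of_adj A hadj) hp
      by_contra hc
      have hlt : pvLt A p = true := by
        revert hc; cases pvLt A p <;> simp
      unfold pvLe at hle
      rcases (by simpa using hle : p = A ∨ pvLt p A = true) with hpa | hpa
      · rw [hpa, pvLt_irrefl] at hlt; exact Bool.false_ne_true hlt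
      · exact pvLt_asymm hlt hpa
    · rw [hpiv] at h1; simp at h1
  · rw [h] at h2; exact absurd h2.symm h3

theorem stepA_some (A C : List Int) (h : pvStepA A = C) (hne : C ≠ []) :
    C.Perm A ∧ pvLt A C = true ∧
    ∀ p, p.Perm A → pvLt A p = true → pvLe C p = true := by
  rcases step_eq A with ⟨_, h2⟩ | ⟨C', h1, h2, h3⟩
  · rw [h] at h2; exact absurd h2 hne
  · rw [h] at h2
    subst h2
    obtain ⟨X, a, mid, b, tail, hA, hC, hab, hd1, hd2, hmin⟩ := stepB_decomp A C h1
    have p1 : (mid ++ a :: tail).Perm (a :: (mid ++ tail)) := List.perm_middle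
    have p2 : (mid ++ b :: tail).Perm (b :: (mid ++ tail)) := List.perm_middle
    have hr : ((mid ++ a :: tail).reverse).Pairwise (· ≤ ·) := by
      rw [List.pairwise_reverse]
      exact hd2
    have hrp : ((mid ++ a :: tail).reverse).Perm (a :: (mid ++ tail)) :=
      ((mid ++ a :: tail).reverse_perm).trans p1
    refine ⟨?_, ?_, ?_⟩
    · rw [hA, hC]
      apply List.Perm.append_left
      exact ((((mid ++ a :: tail).reverse_perm.trans p1).cons b).trans
        ((List.Perm.swap a b (mid ++ tail)).trans (p2.symm.cons a)))
    · rw [hA, hC, pvLt_append]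
      simp [pvLt, hab]
    · intro p hp hlt
      rw [hA] at hp hlt
      rw [hC]
      apply prefix_lift X _ _ ?_ p hp hlt
      intro q hq hqlt
      exact step_core a b mid tail q _ hd1 hab hmin hr hrp hq hqlt

-- ===== counting; fuel sufficiency =====

def pvCount (A : List Int) : Nat :=
  ((A.permutations.dedup).filter (fun p => pvLe A p)).length

theorem self_mem_count (A : List Int) : A ∈ (A.permutations.dedup).filter (fun p => pvLe A p) := by
  rw [List.mem_filter, List.mem_dedup, List.mem_permutations]
  exact ⟨List.Perm.refl A, pvLe_refl A⟩

theorem count_two (A p : List Int) (hp : p.Perm A) (hlt : pvLt A p = true) : 2 ≤ pvCount A := by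
  have hmem : p ∈ (A.permutations.dedup).filter (fun q => pvLe A q) := by
    rw [List.mem_filter, List.mem_dedup, List.mem_permutations]
    exact ⟨hp, by simp [pvLe, hlt]⟩
  have hne : A ≠ p := by
    intro he; rw [← he, pvLt_irrefl] at hlt; exact Bool.false_ne_true hlt
  exact two_le_length (self_mem_count A) hmem hne

theorem count_step (A C : List Int) (h : pvStepA A = C) (hne : C ≠ []) :
    pvCount C < pvCount A := by
  obtain ⟨hperm, hlt, hmin⟩ := stepA_some A C h hne
  have hLC : (C.permutations.dedup).Perm (A.permutations.dedup) := (hperm.permutations).dedup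
  have hNC : pvCount C = ((A.permutations.dedup).filter (fun p => pvLe C p)).length := by
    unfold pvCount
    exact (List.Perm.filter _ hLC).length_eq
  have hnodup2 : (A :: (A.permutations.dedup).filter (fun p => pvLe C p)).Nodup := by
    rw [List.nodup_cons]
    refine ⟨?_, (List.nodup_dedup _).filter _⟩
    intro hmem
    have hca := (List.mem_filter.mp hmem).2
    have := pvLt_of_lt_of_le hlt hca
    rw [pvLt_irrefl] at this
    exact Bool.false_ne_true this
  have hkey : ((A.permutations.dedup).filter (fun p => pvLe A p)).Perm
      (A :: (A.permutations.dedup).filter (fun p => pvLe C p)) := by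
    rw [List.perm_ext_iff_of_nodup ((List.nodup_dedup _).filter _) hnodup2]
    intro q
    rw [List.mem_filter, List.mem_cons, List.mem_filter]
    constructor
    · rintro ⟨hqL, hle⟩
      have hqA : q.Perm A := by rwa [List.mem_dedup, List.mem_permutations] at hqL
      unfold pvLe at hle
      rcases (by simpa using hle : A = q ∨ pvLt A q = true) with hq | hlt2
      · exact Or.inl hq.symm
      · exact Or.inr ⟨hqL, hmin q hqA hlt2⟩
    · rintro (rfl | ⟨hqL, hle⟩)
      · refine ⟨?_, pvLe_refl q⟩
        rw [List.mem_dedup, List.mem_permutations]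
      · refine ⟨hqL, ?_⟩
        have := pvLt_of_lt_of_le hlt hle
        simp [pvLe, this]
  have hlen := hkey.length_eq
  have hA : pvCount A = (List.filter (fun p => pvLe C p) A.permutations.dedup).length + 1 := by
    unfold pvCount
    rw [hlen, List.length_cons]
  omega

theorem count_le_factorial (A : List Int) : pvCount A ≤ Nat.factorial A.length := by
  calc pvCount A ≤ (A.permutations.dedup).length := List.length_filter_le _ _
    _ ≤ A.permutations.length := (List.dedup_sublist _).length_le
    _ = Nat.factorial A.length := List.length_permutations A

theorem loopA_spec : ∀ (f : Nat) (A : List Int), pvCount A ≤ f + 1 →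
    (pvLoopA f A).Pairwise (fun p q => pvLt p q = true) ∧
    ∀ p, p ∈ pvLoopA f A ↔ (p.Perm A ∧ pvLe A p = true) := by
  intro f
  induction f with
  | zero =>
    intro A hc
    refine ⟨by simp [pvLoopA], ?_⟩
    intro p
    simp only [pvLoopA, List.mem_singleton]
    constructor
    · rintro rfl; exact ⟨List.Perm.refl _, pvLe_refl _⟩
    · rintro ⟨hp, hle⟩
      unfold pvLe at hle
      rcases (by simpa using hle : A = p ∨ pvLt A p = true) with hq | hlt
      · exact hq.symm
      · have := count_two A p hp hlt; omega
  | succ f ih =>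
    intro A hc
    by_cases h : pvStepA A = []
    · have heq : pvLoopA (f + 1) A = [A] := by simp [pvLoopA, h]
      rw [heq]
      refine ⟨by simp, ?_⟩
      intro p
      simp only [List.mem_singleton]
      constructor
      · rintro rfl; exact ⟨List.Perm.refl _, pvLe_refl _⟩
      · rintro ⟨hp, hle⟩
        unfold pvLe at hle
        rcases (by simpa using hle : A = p ∨ pvLt A p = true) with hq | hlt
        · exact hq.symm
        · have := stepA_none A h p hp
          rw [this] at hlt
          exact (Bool.false_ne_true hlt).elim
    · have heq : pvLoopA (f + 1) A = A :: pvLoopA f (pvStepA A) := by simp [pvLoopA, h]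
      obtain ⟨hperm, hlt, hmin⟩ := stepA_some A (pvStepA A) rfl h
      have hcnt : pvCount (pvStepA A) ≤ f + 1 := by
        have := count_step A (pvStepA A) rfl h
        omega
      obtain ⟨ihpw, ihmem⟩ := ih (pvStepA A) hcnt
      rw [heq]
      constructor
      · rw [List.pairwise_cons]
        refine ⟨?_, ihpw⟩
        intro q hq
        obtain ⟨hq1, hq2⟩ := (ihmem q).mp hq
        exact pvLt_of_lt_of_le hlt hq2
      · intro p
        rw [List.mem_cons, ihmem]
        constructor
        · rintro (rfl | ⟨hp1, hp2⟩)
          · exact ⟨List.Perm.refl _, pvLe_refl _⟩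
          · refine ⟨hp1.trans hperm, ?_⟩
            have := pvLt_of_lt_of_le hlt hp2
            simp [pvLe, this]
        · rintro ⟨hp, hle⟩
          unfold pvLe at hle
          rcases (by simpa using hle : A = p ∨ pvLt A p = true) with hq | hlt2
          · exact Or.inl hq.symm
          · exact Or.inr ⟨hp.trans hperm.symm, hmin p hp hlt2⟩

theorem A_char (A : List Int) :
    (permutations_v3 A).Pairwise (fun p q => pvLt p q = true) ∧
    ∀ p, p ∈ permutations_v3 A ↔ (p.Perm A ∧ pvLe A p = true) :=
  loopA_spec _ A (le_trans (count_le_factorial A) (Nat.le_succ _))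

-- ===== analysis of port B =====

def pvBlock (A pre : List Int) (tight : Bool) (f : Nat) (rem : List Int) (k : Nat) :
    List (List Int) :=
  let v := rem.getD k 0
  if 0 < k ∧ rem.getD (k - 1) 0 = v then []
  else if tight && decide (v < A.getD pre.length 0) then []
  else pvRecB A f (pre ++ [v]) (rem.take k ++ rem.drop (k + 1))
        (tight && decide (v = A.getD pre.length 0))

theorem recB_succ (A pre : List Int) (r : Int) (rs : List Int) (tight : Bool) (f : Nat) :
    pvRecB A (f + 1) pre (r :: rs) tight
      = (List.range (r :: rs).length).flatMap (pvBlock A pre tight f (r :: rs)) := by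
  have hfun : (fun (acc : List (List Int)) k =>
      let rem := r :: rs
      let v := rem.getD k 0
      if 0 < k ∧ rem.getD (k - 1) 0 = v then acc
      else if tight && decide (v < A.getD pre.length 0) then acc
      else acc ++ pvRecB A f (pre ++ [v]) (rem.take k ++ rem.drop (k + 1))
            (tight && decide (v = A.getD pre.length 0)))
      = (fun acc k => acc ++ pvBlock A pre tight f (r :: rs) k) := by
    funext acc k
    simp only [pvBlock]
    split_ifs <;> simp
  simp only [pvRecB]
  rw [hfun, PySem.List.foldl_append_eq_flatMap]
  simp

def pvFirstIdx (v : Int) : List Int → Nat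
  | [] => 0
  | a :: l => if a = v then 0 else pvFirstIdx v l + 1

theorem firstIdx_spec (v : Int) : ∀ (l : List Int), v ∈ l →
    pvFirstIdx v l < l.length ∧ l.getD (pvFirstIdx v l) 0 = v ∧
    ∀ t, t < pvFirstIdx v l → l.getD t 0 ≠ v := by
  intro l
  induction l with
  | nil => intro h; simp at h
  | cons a l ih =>
    intro hv
    by_cases h : a = v
    · refine ⟨by simp [pvFirstIdx, h], by simp [pvFirstIdx, h], ?_⟩
      intro t ht
      simp [pvFirstIdx, h] at ht
    · have hv' : v ∈ l := by
        rcases List.mem_cons.mp hv with rfl | h'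
        · exact absurd rfl h
        · exact h'
      obtain ⟨h1, h2, h3⟩ := ih hv'
      rw [pvFirstIdx, if_neg h]
      refine ⟨by simp only [List.length_cons]; omega, by simpa using h2, ?_⟩
      intro t ht
      cases t with
      | zero => simpa using h
      | succ t => simpa using h3 t (by omega)

theorem sorted_getD_mono (l : List Int) (h : List.Pairwise (· ≤ ·) l) (s t : Nat)
    (hst : s ≤ t) (ht : t < l.length) : l.getD s 0 ≤ l.getD t 0 := by
  rcases Nat.lt_or_ge s t with hlt | hge
  · rw [List.getD_eq_getElem _ _ (by omega), List.getD_eq_getElem _ _ ht]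
    exact List.pairwise_iff_getElem.mp h s t (by omega) ht hlt
  · have : s = t := by omega
    subst this; rfl

theorem list_decomp_at (l : List Int) (k : Nat) (h : k < l.length) :
    l = l.take k ++ l.getD k 0 :: l.drop (k + 1) := by
  conv_lhs => rw [← List.take_append_drop k l]
  rw [← List.getElem_cons_drop h, List.getD_eq_getElem _ _ h]

theorem flat_pairwise (ks : List Nat) (g : Nat → List (List Int))
    (h1 : ∀ k ∈ ks, (g k).Pairwise (fun p q => pvLt p q = true))
    (h2 : ks.Pairwise (fun k k' => ∀ a ∈ g k, ∀ b ∈ g k', pvLt a b = true)) :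
    (ks.flatMap g).Pairwise (fun p q => pvLt p q = true) := by
  induction ks with
  | nil => simp
  | cons k ks ih =>
    rw [List.flatMap_cons, List.pairwise_append]
    obtain ⟨hk, hks⟩ := List.pairwise_cons.mp h2
    refine ⟨h1 k (List.mem_cons_self ..), ih (fun k' h => h1 k' (List.mem_cons_of_mem _ h)) hks, ?_⟩
    intro a hak b hb
    obtain ⟨k', hk', hbk'⟩ := List.mem_flatMap.mp hb
    exact hk k' hk' a hak b hbk'

theorem recB_spec : ∀ (f : Nat) (A pre rem : List Int) (tight : Bool),
    rem.length = f → List.Pairwise (· ≤ ·) rem → pre.length + rem.length = A.length →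
    (pvRecB A f pre rem tight).Pairwise (fun p q => pvLt p q = true) ∧
    (∀ p, p ∈ pvRecB A f pre rem tight ↔
      ∃ s, p = pre ++ s ∧ s.Perm rem ∧ (tight = true → pvLe (A.drop pre.length) s = true)) := by
  intro f
  induction f with
  | zero =>
    intro A pre rem tight hlen hpw hinv
    have hrem : rem = [] := List.eq_nil_of_length_eq_zero hlen
    subst hrem
    constructor
    · simp [pvRecB]
    · intro p
      simp only [pvRecB, List.mem_singleton]
      constructor
      · rintro rfl
        refine ⟨[], by simp, List.Perm.refl _, ?_⟩
        intro _
        rw [List.drop_eq_nil_of_le (by omega)]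
        simp [pvLe]
      · rintro ⟨s, rfl, hs, _⟩
        rw [List.perm_nil.mp hs]
        simp
  | succ f ih =>
    intro A pre rem tight hlen hpw hinv
    cases rem with
    | nil => simp at hlen
    | cons r rs =>
      rw [recB_succ]
      simp only [List.length_cons] at hlen hinv
      have hn1 : (r :: rs).length = f + 1 := by simp [hlen]
      have hmA : pre.length < A.length := by omega
      have hdropm : A.drop pre.length = A.getD pre.length 0 :: A.drop (pre.length + 1) := by
        rw [List.getD_eq_getElem _ _ hmA, List.getElem_cons_drop]
      -- facts for an index k
      have hdec : ∀ k, k < (r :: rs).length →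
          (r :: rs) = (r :: rs).take k ++ (r :: rs).getD k 0 :: (r :: rs).drop (k + 1) :=
        fun k hk => list_decomp_at _ k hk
      have hsub : ∀ k, k < (r :: rs).length →
          ((r :: rs).take k ++ (r :: rs).drop (k + 1)).Sublist (r :: rs) := by
        intro k hk
        conv_rhs => rw [hdec k hk]
        exact List.Sublist.append_left (List.sublist_cons_self ..) _
      have hlen' : ∀ k, k < (r :: rs).length →
          ((r :: rs).take k ++ (r :: rs).drop (k + 1)).length = f := by
        intro k hk
        rw [List.length_append, List.length_take, List.length_drop]
        simp only [List.length_cons] at hk ⊢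
        omega
      have hih : ∀ k, k < (r :: rs).length → ∀ tg,
          (pvRecB A f (pre ++ [(r :: rs).getD k 0])
            ((r :: rs).take k ++ (r :: rs).drop (k + 1)) tg).Pairwise
              (fun p q => pvLt p q = true) ∧
          (∀ p, p ∈ pvRecB A f (pre ++ [(r :: rs).getD k 0])
              ((r :: rs).take k ++ (r :: rs).drop (k + 1)) tg ↔
            ∃ s, p = (pre ++ [(r :: rs).getD k 0]) ++ s ∧
              s.Perm ((r :: rs).take k ++ (r :: rs).drop (k + 1)) ∧
              (tg = true → pvLe (A.drop (pre ++ [(r :: rs).getD k 0]).length) s = true)) := by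
        intro k hk tg
        exact ih A (pre ++ [(r :: rs).getD k 0]) _ tg (hlen' k hk)
          (List.Pairwise.sublist (hsub k hk) hpw)
          (by rw [List.length_append, hlen' k hk]; simp only [List.length_singleton]; omega)
      -- membership of a block, in closed form
      have hblock : ∀ k, k < (r :: rs).length → ∀ p,
          p ∈ pvBlock A pre tight f (r :: rs) k ↔
          (¬(0 < k ∧ (r :: rs).getD (k - 1) 0 = (r :: rs).getD k 0) ∧
           ¬((tight && decide ((r :: rs).getD k 0 < A.getD pre.length 0)) = true) ∧
           ∃ s', p = pre ++ (r :: rs).getD k 0 :: s' ∧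
             s'.Perm ((r :: rs).take k ++ (r :: rs).drop (k + 1)) ∧
             ((tight && decide ((r :: rs).getD k 0 = A.getD pre.length 0)) = true →
               pvLe (A.drop (pre.length + 1)) s' = true)) := by
        intro k hk p
        unfold pvBlock
        by_cases hc1 : 0 < k ∧ (r :: rs).getD (k - 1) 0 = (r :: rs).getD k 0
        · rw [if_pos hc1]
          simp only [List.not_mem_nil, false_iff]
          rintro ⟨hns1, _, _⟩
          exact hns1 hc1
        · rw [if_neg hc1]
          by_cases hc2 : (tight && decide ((r :: rs).getD k 0 < A.getD pre.length 0)) = true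
          · rw [if_pos hc2]
            simp only [List.not_mem_nil, false_iff]
            rintro ⟨_, hns2, _⟩
            exact hns2 hc2
          · rw [if_neg hc2]
            rw [(hih k hk _).2 p]
            constructor
            · rintro ⟨s', rfl, hs', ht'⟩
              refine ⟨hc1, hc2, s', by simp, hs', ?_⟩
              intro h
              have := ht' h
              rwa [List.length_append, List.length_singleton] at this
            · rintro ⟨_, _, s', hp, hs', ht'⟩
              refine ⟨s', by simpa using hp, hs', ?_⟩
              intro h
              rw [List.length_append, List.length_singleton]
              exact ht' h
      constructor
      · -- pairwise
        apply flat_pairwise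
        · intro k hk
          have hkr := List.mem_range.mp hk
          unfold pvBlock
          by_cases h1 : 0 < k ∧ (r :: rs).getD (k - 1) 0 = (r :: rs).getD k 0
          · rw [if_pos h1]; simp
          · rw [if_neg h1]
            by_cases h2 : (tight && decide ((r :: rs).getD k 0 < A.getD pre.length 0)) = true
            · rw [if_pos h2]; simp
            · rw [if_neg h2]; exact (hih k hkr _).1
        · rw [List.pairwise_iff_getElem]
          intro x y hx hy hxy
          simp only [List.length_range] at hx hy
          simp only [List.getElem_range]
          intro p hp q hq
          obtain ⟨hns1, hns2, s1, rfl, hs1, _⟩ := (hblock x hx p).mp hp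
          obtain ⟨hnt1, hnt2, s2, rfl, hs2, _⟩ := (hblock y hy q).mp hq
          have hvv : (r :: rs).getD x 0 < (r :: rs).getD y 0 := by
            have h0y : 0 < y := by omega
            have hne : (r :: rs).getD (y - 1) 0 ≠ (r :: rs).getD y 0 := by
              intro hh; exact hnt1 ⟨h0y, hh⟩
            have hle1 : (r :: rs).getD (y - 1) 0 ≤ (r :: rs).getD y 0 :=
              sorted_getD_mono _ hpw _ _ (by omega) hy
            have hle2 : (r :: rs).getD x 0 ≤ (r :: rs).getD (y - 1) 0 :=
              sorted_getD_mono _ hpw _ _ (by omega) (by omega)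
            omega
          rw [pvLt_append]
          simp only [pvLt, Bool.or_eq_true, Bool.and_eq_true, decide_eq_true_eq]
          exact Or.inl hvv
      · -- membership
        intro p
        rw [List.mem_flatMap]
        constructor
        · rintro ⟨k, hk, hp⟩
          have hkr := List.mem_range.mp hk
          obtain ⟨hns1, hns2, s', rfl, hs', ht'⟩ := (hblock k hkr p).mp hp
          refine ⟨(r :: rs).getD k 0 :: s', rfl, ?_, ?_⟩
          · have h1 : ((r :: rs).getD k 0 :: s').Perm
                ((r :: rs).getD k 0 :: ((r :: rs).take k ++ (r :: rs).drop (k + 1))) :=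
              hs'.cons _
            have h2 : ((r :: rs).getD k 0 :: ((r :: rs).take k ++ (r :: rs).drop (k + 1))).Perm
                ((r :: rs).take k ++ (r :: rs).getD k 0 :: (r :: rs).drop (k + 1)) :=
              List.perm_middle.symm
            have := h1.trans h2
            rwa [← hdec k hkr] at this
          · intro ht
            subst ht
            rw [hdropm]
            have hnlt : ¬((r :: rs).getD k 0 < A.getD pre.length 0) := by
              intro hh
              exact hns2 (by simp only [Bool.true_and, decide_eq_true_eq]; exact hh)
            rcases lt_or_eq_of_le (not_lt.mp hnlt) with hlt | heq
            · simp only [pvLe, pvLt, Bool.or_eq_true, Bool.and_eq_true,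
                decide_eq_true_eq, List.cons.injEq]
              exact Or.inr (Or.inl hlt)
            · rw [heq, pvLe_cons_same]
              exact ht' (by simp only [Bool.true_and, decide_eq_true_eq]; exact heq.symm)
        · rintro ⟨s, rfl, hs, htight⟩
          cases s with
          | nil => simpa using hs.length_eq
          | cons v0 s' =>
            have hv0 : v0 ∈ r :: rs := hs.mem_iff.mp (List.mem_cons_self ..)
            obtain ⟨hk, hkv, hkmin⟩ := firstIdx_spec v0 (r :: rs) hv0
            refine ⟨pvFirstIdx v0 (r :: rs), List.mem_range.mpr hk, ?_⟩
            rw [hblock _ hk]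
            have hns2 : ¬((tight && decide ((r :: rs).getD (pvFirstIdx v0 (r :: rs)) 0
                < A.getD pre.length 0)) = true) := by
              rw [hkv]
              intro hh
              simp only [Bool.and_eq_true, decide_eq_true_eq] at hh
              obtain ⟨htt, hvlt⟩ := hh
              have h2 := htight htt
              rw [hdropm] at h2
              simp only [pvLe, pvLt, Bool.or_eq_true, Bool.and_eq_true,
                decide_eq_true_eq, List.cons.injEq] at h2
              rcases h2 with ⟨h2a, _⟩ | h2a | ⟨h2a, _⟩ <;> omega
            refine ⟨?_, hns2, s', by rw [hkv], ?_, ?_⟩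
            · rintro ⟨h0k, hdup⟩
              exact hkmin (pvFirstIdx v0 (r :: rs) - 1) (by omega) (by rw [hdup, hkv])
            · have hdeck := hdec _ hk
              rw [hkv] at hdeck
              have h2 : ((r :: rs).take (pvFirstIdx v0 (r :: rs)) ++
                    v0 :: (r :: rs).drop (pvFirstIdx v0 (r :: rs) + 1)).Perm
                  (v0 :: ((r :: rs).take (pvFirstIdx v0 (r :: rs)) ++
                    (r :: rs).drop (pvFirstIdx v0 (r :: rs) + 1))) := List.perm_middle
              have hstep : (r :: rs).Perm (v0 :: ((r :: rs).take (pvFirstIdx v0 (r :: rs)) ++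
                  (r :: rs).drop (pvFirstIdx v0 (r :: rs) + 1))) := by
                conv_lhs => rw [hdeck]
                exact h2
              exact (hs.trans hstep).cons_inv
            · intro htg
              simp only [hkv, Bool.and_eq_true, decide_eq_true_eq] at htg
              obtain ⟨htt, hveq⟩ := htg
              have h2 := htight htt
              rw [hdropm, ← hveq, pvLe_cons_same] at h2
              exact h2

theorem B_char (A : List Int) :
    (permutations_v3_alt A).Pairwise (fun p q => pvLt p q = true) ∧
    ∀ p, p ∈ permutations_v3_alt A ↔ (p.Perm A ∧ pvLe A p = true) := by
  have hsp : (PySem.List.sorted A (fun x => x)).Pairwise (· ≤ ·) := by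
    have := PySem.List.sorted_pairwise A (fun x => x)
    simpa using this
  have hperm := PySem.List.sorted_perm A (fun x => x) false
  have hlen := PySem.List.length_sorted A (fun x => x) false
  obtain ⟨h1, h2⟩ := recB_spec (PySem.List.sorted A (fun x => x)).length A []
      (PySem.List.sorted A (fun x => x)) true rfl hsp (by simpa using hlen)
  refine ⟨h1, ?_⟩
  intro p
  unfold permutations_v3_alt
  rw [h2 p]
  constructor
  · rintro ⟨s, rfl, hs, ht⟩
    try simp only [List.nil_append]
    refine ⟨hs.trans hperm, ?_⟩
    simpa using ht rfl
  · rintro ⟨hp, hle⟩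
    exact ⟨p, by simp, hp.trans hperm.symm, fun _ => by simpa using hle⟩

-- ===== VERDICT (by name: the statement is the Claim_ definition above) =====
theorem permutations_v3_spec : Claim_equal_permutations_v3 := by
  intro A _
  unfold Spec_permutations_v3
  obtain ⟨hpwA, hmemA⟩ := A_char A
  obtain ⟨hpwB, hmemB⟩ := B_char A
  exact pw_ext _ _ hpwA hpwB (fun x => (hmemA x).trans (hmemB x).symm)
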